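-- pv_equiv track=rewrite | github.com/pypi-data/pypi-mirror-397 | packages/xulbux/xulbux-1.9.2.tar.gz/xulbux-1.9.2/src/xulbux/console.py | __add_back_removed_parts
-- ===== SOURCE A (Python) =====
-- def __add_back_removed_parts(split_string: list[str], removals: tuple[tuple[int, str], ...]) -> list[str]:
--     """Adds back the removed parts into the split string parts at their original positions."""
--     lengths, cumulative_pos = [len(s) for s in split_string], [0]
--     for length in lengths:
--         cumulative_pos.append(cumulative_pos[-1] + length)
--     result, offset_adjusts = split_string.copy(), [0] * len(split_string)
--     last_idx, total_length = len(split_string) - 1, cumulative_pos[-1]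
--
--     def find_string_part(pos: int) -> int:
--         left, right = 0, len(cumulative_pos) - 1
--         while left < right:
--             mid = (left + right) // 2
--             if cumulative_pos[mid] <= pos < cumulative_pos[mid + 1]:
--                 return mid
--             elif pos < cumulative_pos[mid]:
--                 right = mid
--             else:
--                 left = mid + 1
--         return left
--
--     for pos, removal in removals:
--         if pos >= total_length:
--             result[last_idx] = result[last_idx] + removal
--             continue
--         i = find_string_part(pos)
--         adjusted_pos = (pos - cumulative_pos[i]) + offset_adjusts[i]
--         parts = [result[i][:adjusted_pos], removal, result[i][adjusted_pos:]]
--         result[i] = "".join(parts)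
--         offset_adjusts[i] += len(removal)
--
--     return result
-- ===== SOURCE B (Python) =====
-- # B: groups removals per target part (classified by counting cumulative boundaries <= pos),
-- # then rebuilds each part independently with a local fold; alternative decomposition, same results.
-- def __add_back_removed_parts(split_string: list[str], removals: tuple[tuple[int, str], ...]) -> list[str]:
--     cum = [0]
--     for s in split_string:
--         cum.append(cum[-1] + len(s))
--     total, n = cum[-1], len(split_string)
--     buckets = [[] for _ in range(n)]
--     for pos, removal in removals:
--         if pos >= total:
--             buckets[n - 1].append((None, removal))
--         else:
--             i = sum(1 for c in cum[1:] if c <= pos)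
--             buckets[i].append((pos - cum[i], removal))
--     out = []
--     for piece, ops in zip(split_string, buckets):
--         off = 0
--         for rel, r in ops:
--             if rel is None:
--                 piece = piece + r
--             else:
--                 q = rel + off
--                 piece = piece[:q] + r + piece[q:]
--                 off += len(r)
--         out.append(piece)
--     return out
-- ===== Notes on version B (the rewrite author's own statement) =====
-- stated objective: alternative
-- what changed: Instead of A's single pass that binary-searches each removal position and patches a mutable result/offset array pair, B first groups all removals into per-part buckets (classifying each position by counting cumulative boundaries <= pos) and then rebuilds every part independently with one local fold.
import Mathlib
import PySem

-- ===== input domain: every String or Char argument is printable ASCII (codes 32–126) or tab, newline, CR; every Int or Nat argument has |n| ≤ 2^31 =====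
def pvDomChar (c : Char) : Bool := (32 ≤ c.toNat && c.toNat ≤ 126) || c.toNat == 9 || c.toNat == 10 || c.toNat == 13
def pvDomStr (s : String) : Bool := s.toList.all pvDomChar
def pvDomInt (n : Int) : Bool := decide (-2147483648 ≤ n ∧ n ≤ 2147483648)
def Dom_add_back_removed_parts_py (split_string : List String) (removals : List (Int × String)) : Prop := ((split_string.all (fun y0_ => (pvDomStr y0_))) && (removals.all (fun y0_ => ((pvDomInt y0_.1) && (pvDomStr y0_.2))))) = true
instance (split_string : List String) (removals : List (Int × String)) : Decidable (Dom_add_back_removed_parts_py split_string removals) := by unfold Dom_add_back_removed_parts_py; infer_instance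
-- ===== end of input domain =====

-- B groups the removals per target part first and then rebuilds each part independently with one
-- local fold (alternative decomposition, same return values; neither program mutates its arguments).

-- ===== PORT A =====
-- while left < right: … (binary search of A's inner `find_string_part`; indices stay in range by the recursion)
def pvFindStringPart (cumulative_pos : List Int) (pos : Int) (left right : Nat) : Nat :=
  if _h : left < right then
    let mid := (left + right) / 2   -- Python `(left + right) // 2` on nonnegative ints = Nat division
    if cumulative_pos.getD mid 0 ≤ pos ∧ pos < cumulative_pos.getD (mid + 1) 0 then mid
    else if pos < cumulative_pos.getD mid 0 then pvFindStringPart cumulative_pos pos left mid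
    else pvFindStringPart cumulative_pos pos (mid + 1) right
  else left
termination_by right - left
decreasing_by all_goals omega

-- `for length in lengths: cumulative_pos.append(cumulative_pos[-1] + length)` starting from [0]
def pvCumA (lengths : List Int) : List Int :=
  lengths.foldl (fun c length => c ++ [PySem.List.pyGetD c (-1) 0 + length]) [0]

-- one iteration of A's `for pos, removal in removals` loop over the state (result, offset_adjusts)
def pvStepA (cumulative_pos : List Int) (total_length last_idx : Int)
    (st : List String × List Int) (rm : Int × String) : List String × List Int :=
  if rm.1 ≥ total_length then
    (PySem.List.pySetD st.1 last_idx (PySem.List.pyGetD st.1 last_idx "" ++ rm.2), st.2)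
  else
    let i := pvFindStringPart cumulative_pos rm.1 0 (cumulative_pos.length - 1)
    let adjusted_pos := (rm.1 - cumulative_pos.getD i 0) + st.2.getD i 0
    let s := st.1.getD i ""
    (st.1.set i (PySem.Str.join ""
        [PySem.Str.slice s none (some adjusted_pos), rm.2, PySem.Str.slice s (some adjusted_pos) none]),
     st.2.set i (st.2.getD i 0 + PySem.Str.len rm.2))

def add_back_removed_parts_py (split_string : List String) (removals : List (Int × String)) : List String :=
  let lengths := split_string.map PySem.Str.len
  let cumulative_pos := pvCumA lengths
  (removals.foldl
    (pvStepA cumulative_pos (PySem.List.pyGetD cumulative_pos (-1) 0) ((split_string.length : Int) - 1))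
    (split_string, List.replicate split_string.length (0 : Int))).1

-- ===== PORT B =====
-- `for s in split_string: cum.append(cum[-1] + len(s))` starting from [0]
def pvCumB (split_string : List String) : List Int :=
  split_string.foldl (fun c s => c ++ [PySem.List.pyGetD c (-1) 0 + PySem.Str.len s]) [(0 : Int)]

-- `sum(1 for c in cum[1:] if c <= pos)` — a 0/1 generator sum is a count
def pvClassB (cum : List Int) (pos : Int) : Nat :=
  (PySem.List.slice cum (some 1) none).countP (fun c => decide (c ≤ pos))

-- one iteration of B's bucket-filling loop
def pvBucketStep (cum : List Int) (total : Int) (n : Nat)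
    (bk : List (List (Option Int × String))) (rm : Int × String) : List (List (Option Int × String)) :=
  if rm.1 ≥ total then
    PySem.List.pySetD bk ((n : Int) - 1) (PySem.List.pyGetD bk ((n : Int) - 1) [] ++ [(none, rm.2)])
  else
    let i := pvClassB cum rm.1
    bk.set i (bk.getD i [] ++ [(some (rm.1 - cum.getD i 0), rm.2)])

-- one iteration of B's inner per-part loop over the state (piece, off)
def pvPartStep (st : String × Int) (op : Option Int × String) : String × Int :=
  match op.1 with
  | none => (st.1 ++ op.2, st.2)
  | some rel =>
      let q := rel + st.2
      (PySem.Str.slice st.1 none (some q) ++ op.2 ++ PySem.Str.slice st.1 (some q) none,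
       st.2 + PySem.Str.len op.2)

def add_back_removed_parts_py_alt (split_string : List String) (removals : List (Int × String)) : List String :=
  let cum := pvCumB split_string
  let total := PySem.List.pyGetD cum (-1) 0
  let n := split_string.length
  let buckets :=
    removals.foldl (pvBucketStep cum total n)
      ((List.range n).map (fun _ => ([] : List (Option Int × String))))
  (split_string.zip buckets).map (fun pz => (pz.2.foldl pvPartStep (pz.1, (0 : Int))).1)

-- ===== PRECONDITION & SPEC =====
-- Pre_ excludes exactly the inputs on which A raises IndexError: an empty split_string together with
-- a nonempty removals list (`result[last_idx]` / `result[i]` on the empty result list).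
def Pre_add_back_removed_parts_py (split_string : List String) (removals : List (Int × String)) : Prop :=
  removals = [] ∨ split_string ≠ []
instance (split_string : List String) (removals : List (Int × String)) : Decidable (Pre_add_back_removed_parts_py split_string removals) := by unfold Pre_add_back_removed_parts_py; infer_instance

def pvWitness_add_back_removed_parts_py : List String × (List (Int × String)) :=
  (["ab", "cd"], [(1, "X"), (5, "Y"), (0, "!")])

def Spec_add_back_removed_parts_py (split_string : List String) (removals : List (Int × String)) (out : List String) : Prop := out = add_back_removed_parts_py_alt split_string removals
instance (split_string : List String) (removals : List (Int × String)) (out : List String) : Decidable (Spec_add_back_removed_parts_py split_string removals out) := by unfold Spec_add_back_removed_parts_py; infer_instance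

-- ===== CLAIM (what is proved, stated in full; the proofs are below) =====
def Claim_equal_add_back_removed_parts_py : Prop := ∀ (split_string : List String) (removals : List (Int × String)), Dom_add_back_removed_parts_py split_string removals → Pre_add_back_removed_parts_py split_string removals → Spec_add_back_removed_parts_py split_string removals (add_back_removed_parts_py split_string removals)

-- ===== LEMMAS AND PROOFS =====

-- recursive normal form of the cumulative-positions list built by both ports
def pvCums : Int → List String → List Int
  | a, [] => [a]
  | a, s :: rest => a :: pvCums (a + PySem.Str.len s) rest

theorem pvCums_foldl (l : List String) : ∀ (acc : List Int) (h : acc ≠ []),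
    l.foldl (fun c s => c ++ [PySem.List.pyGetD c (-1) 0 + PySem.Str.len s]) acc
      = acc.dropLast ++ pvCums (acc.getLast h) l := by
  induction l with
  | nil => intro acc h; simp [pvCums, List.dropLast_concat_getLast h]
  | cons s rest ih =>
      intro acc h
      simp only [List.foldl_cons]
      rw [PySem.List.pyGetD_neg_one acc 0 h]
      rw [ih (acc ++ [acc.getLast h + PySem.Str.len s]) (by simp)]
      simp only [pvCums, List.dropLast_concat, List.getLast_concat]
      rw [show acc.dropLast ++ acc.getLast h :: pvCums (acc.getLast h + PySem.Str.len s) rest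
            = (acc.dropLast ++ [acc.getLast h]) ++ pvCums (acc.getLast h + PySem.Str.len s) rest by simp,
          List.dropLast_concat_getLast h]

theorem pvCumB_eq (split : List String) : pvCumB split = pvCums 0 split := by
  unfold pvCumB
  rw [pvCums_foldl split [0] (by simp)]
  simp

theorem pvCumA_eq (split : List String) : pvCumA (split.map PySem.Str.len) = pvCumB split := by
  unfold pvCumA pvCumB
  rw [List.foldl_map]

theorem pvCums_length (a : Int) (l : List String) : (pvCums a l).length = l.length + 1 := by
  induction l generalizing a <;> simp [pvCums, *]

theorem pvCums_le_mem (a : Int) (l : List String) (x : Int) (hx : x ∈ pvCums a l) : a ≤ x := by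
  induction l generalizing a with
  | nil => simp [pvCums] at hx; omega
  | cons s rest ih =>
      simp [pvCums] at hx
      rcases hx with h | h
      · omega
      · have := ih _ h
        have hlen : (0:Int) ≤ PySem.Str.len s := by rw [PySem.Str.len_eq]; positivity
        omega

theorem pvCums_pairwise (a : Int) (l : List String) : (pvCums a l).Pairwise (· ≤ ·) := by
  induction l generalizing a with
  | nil => simp [pvCums]
  | cons s rest ih =>
      simp only [pvCums, List.pairwise_cons]
      refine ⟨fun x hx => ?_, ih _⟩
      have := pvCums_le_mem _ _ _ hx
      have hlen : (0:Int) ≤ PySem.Str.len s := by rw [PySem.Str.len_eq]; positivity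
      omega

theorem pvCums_head (a : Int) (l : List String) : (pvCums a l).getD 0 0 = a := by
  cases l <;> simp [pvCums]

theorem pvCums_nonneg (l : List String) (k : Nat) (hk : k < (pvCums 0 l).length) :
    0 ≤ (pvCums 0 l).getD k 0 := by
  rw [List.getD_eq_getElem _ _ hk]
  exact pvCums_le_mem 0 l _ (List.getElem_mem hk)

-- both ports read the total length as cum[-1]; as getD it is cum.getD n 0
theorem pvTotal_eq (split : List String) :
    PySem.List.pyGetD (pvCums 0 split) (-1) 0 = (pvCums 0 split).getD split.length 0 := by
  have hne : pvCums 0 split ≠ [] := by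
    cases split <;> simp [pvCums]
  rw [PySem.List.pyGetD_neg_one _ _ hne, List.getLast_eq_getElem,
      List.getD_eq_getElem _ _ (by rw [pvCums_length]; omega)]
  congr 1
  rw [pvCums_length]
  omega

-- the count in pvClassB, characterised on a sorted list
theorem pvCountP_spec (l : List Int) (pos : Int) (h : l.Pairwise (· ≤ ·)) :
    l.countP (fun c => decide (c ≤ pos)) ≤ l.length ∧
    (∀ k, k < l.countP (fun c => decide (c ≤ pos)) → k < l.length → l.getD k 0 ≤ pos) ∧
    (∀ k, l.countP (fun c => decide (c ≤ pos)) ≤ k → k < l.length → pos < l.getD k 0) := by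
  induction l with
  | nil => simp
  | cons a l ih =>
      rw [List.pairwise_cons] at h
      obtain ⟨ha, hl⟩ := h
      obtain ⟨ih1, ih2, ih3⟩ := ih hl
      by_cases hap : a ≤ pos
      · rw [List.countP_cons_of_pos (by simpa using hap)]
        refine ⟨by simpa using ih1, ?_, ?_⟩
        · intro k hk hk'
          cases k with
          | zero => simpa using hap
          | succ k => exact ih2 k (by omega) (by simpa using hk')
        · intro k hk hk'
          cases k with
          | zero => omega
          | succ k => exact ih3 k (by omega) (by simpa using hk')
      · have hz : l.countP (fun c => decide (c ≤ pos)) = 0 := by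
          rw [List.countP_eq_zero]
          intro x hx
          simp only [decide_eq_true_eq]
          exact fun hxp => hap (le_trans (ha x hx) hxp)
        rw [List.countP_cons_of_neg (by simpa using hap)]
        refine ⟨by simp [hz], ?_, ?_⟩
        · intro k hk hk'; omega
        · intro k hk hk'
          cases k with
          | zero => simpa using lt_of_not_ge hap
          | succ k => exact ih3 k (by omega) (by simpa using hk')

-- A's binary search returns an index r with c[r] ≤ pos < c[r+1] whenever the bracket holds
theorem pvFind_spec_aux (c : List Int) (pos : Int) : ∀ (d left right : Nat), right - left ≤ d →
    left < right → right < c.length → c.getD left 0 ≤ pos → pos < c.getD right 0 →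
    left ≤ pvFindStringPart c pos left right ∧ pvFindStringPart c pos left right < right ∧
    c.getD (pvFindStringPart c pos left right) 0 ≤ pos ∧
    pos < c.getD (pvFindStringPart c pos left right + 1) 0 := by
  intro d
  induction d with
  | zero => intro left right hd hlr _ _ _; omega
  | succ d ih =>
      intro left right hd hlr hrlen hle hgt
      rw [pvFindStringPart]
      simp only [dif_pos hlr]
      set mid := (left + right) / 2 with hmid
      by_cases hcond : c.getD mid 0 ≤ pos ∧ pos < c.getD (mid + 1) 0
      · rw [if_pos hcond]
        exact ⟨by omega, by omega, hcond.1, hcond.2⟩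
      · rw [if_neg hcond]
        by_cases hlt : pos < c.getD mid 0
        · rw [if_pos hlt]
          have hlm : left < mid := by
            rcases Nat.lt_or_ge left mid with h | h
            · exact h
            · exfalso; have heq : mid = left := by omega
              rw [heq] at hlt; omega
          have := ih left mid (by omega) hlm (by omega) hle hlt
          exact ⟨this.1, by omega, this.2.2⟩
        · rw [if_neg hlt]
          have hcm : c.getD mid 0 ≤ pos := by omega
          have hcm1 : c.getD (mid + 1) 0 ≤ pos := by
            by_contra hc
            exact hcond ⟨hcm, by omega⟩
          have hmr : mid + 1 < right := by
            rcases Nat.lt_or_ge (mid + 1) right with h | h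
            · exact h
            · exfalso; have heq : mid + 1 = right := by omega
              rw [heq] at hcm1; omega
          have := ih (mid + 1) right (by omega) hmr hrlen hcm1 hgt
          exact ⟨by omega, this.2⟩

theorem pvFind_spec (c : List Int) (pos : Int) (left right : Nat) :
    left < right → right < c.length → c.getD left 0 ≤ pos → pos < c.getD right 0 →
    left ≤ pvFindStringPart c pos left right ∧ pvFindStringPart c pos left right < right ∧
    c.getD (pvFindStringPart c pos left right) 0 ≤ pos ∧
    pos < c.getD (pvFindStringPart c pos left right + 1) 0 :=
  pvFind_spec_aux c pos (right - left) left right (le_refl _)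

-- when pos is below every entry, A's binary search returns `left`
theorem pvFind_all_gt (c : List Int) (pos : Int)
    (hall : ∀ k, k < c.length → pos < c.getD k 0) : ∀ (d left right : Nat), right - left ≤ d →
    right < c.length → pvFindStringPart c pos left right = left := by
  intro d
  induction d with
  | zero =>
      intro left right hd hr
      rw [pvFindStringPart]
      rcases Nat.lt_or_ge left right with h | h
      · omega
      · simp [Nat.not_lt.mpr h]
  | succ d ih =>
      intro left right hd hr
      rw [pvFindStringPart]
      by_cases hlr : left < right
      · simp only [dif_pos hlr]
        set mid := (left + right) / 2 with hmid
        have hm := hall mid (by omega)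
        rw [if_neg (by omega), if_pos hm]
        exact ih left mid (by omega) (by omega)
      · simp [hlr]

theorem pvTail_getD (l : List Int) (k : Nat) : l.tail.getD k 0 = l.getD (k + 1) 0 := by
  cases l <;> simp [List.getD]

theorem pvClassB_eq_countP_tail (cum : List Int) (pos : Int) :
    pvClassB cum pos = cum.tail.countP (fun c => decide (c ≤ pos)) := by
  rw [pvClassB, PySem.List.slice_from_one]

-- A's binary-search index equals B's count index for every pos < total
theorem pvIndex_eq (split : List String) (pos : Int) (hn : split ≠ [])
    (hlt : pos < (pvCums 0 split).getD split.length 0) :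
    pvFindStringPart (pvCums 0 split) pos 0 ((pvCums 0 split).length - 1)
      = pvClassB (pvCums 0 split) pos := by
  have hlen : (pvCums 0 split).length = split.length + 1 := pvCums_length 0 split
  have hn1 : 1 ≤ split.length := by
    cases split with
    | nil => exact absurd rfl hn
    | cons a b => simp
  have hp : (pvCums 0 split).tail.Pairwise (· ≤ ·) := (pvCums_pairwise 0 split).tail
  obtain ⟨h1, h2, h3⟩ := pvCountP_spec (pvCums 0 split).tail pos hp
  have htl : (pvCums 0 split).tail.length = split.length := by
    rw [List.length_tail, hlen]
    omega
  rw [pvClassB_eq_countP_tail]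
  set m := (pvCums 0 split).tail.countP (fun c => decide (c ≤ pos)) with hm
  have hright : (pvCums 0 split).length - 1 = split.length := by omega
  rw [hright]
  by_cases hpos : 0 ≤ pos
  · have h0 : (pvCums 0 split).getD 0 0 ≤ pos := by rw [pvCums_head]; exact hpos
    obtain ⟨f1, f2, f3, f4⟩ := pvFind_spec (pvCums 0 split) pos 0 split.length hn1 (by omega) h0 hlt
    set r := pvFindStringPart (pvCums 0 split) pos 0 split.length with hr
    rcases Nat.lt_trichotomy r m with h | h | h
    · exfalso
      have := h2 r h (by omega)
      rw [pvTail_getD] at this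
      omega
    · exact h
    · exfalso
      have hmr : m ≤ r - 1 := by omega
      have := h3 (r - 1) hmr (by omega)
      rw [pvTail_getD] at this
      have heq : r - 1 + 1 = r := by omega
      rw [heq] at this
      omega
  · have hall : ∀ k, k < (pvCums 0 split).length → pos < (pvCums 0 split).getD k 0 := by
      intro k hk
      have := pvCums_nonneg split k hk
      omega
    rw [pvFind_all_gt (pvCums 0 split) pos hall split.length 0 split.length (by omega) (by omega)]
    have hz : m = 0 := by
      rw [hm, List.countP_eq_zero]
      intro x hx
      simp only [decide_eq_true_eq]
      have : 0 ≤ x := pvCums_le_mem 0 split x (List.mem_of_mem_tail hx)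
      omega
    omega

-- proof-side classification of one removal: target part index and the per-part operation
def pvClassify (cum : List Int) (total : Int) (n : Nat) (rm : Int × String) :
    Nat × (Option Int × String) :=
  if rm.1 ≥ total then (n - 1, (none, rm.2))
  else
    let i := pvClassB cum rm.1
    (i, (some (rm.1 - cum.getD i 0), rm.2))

-- the operations that end up in bucket j, in arrival order
def pvOpsFor (cum : List Int) (total : Int) (n : Nat) (j : Nat) (rs : List (Int × String)) :
    List (Option Int × String) :=
  rs.filterMap (fun rm =>
    if (pvClassify cum total n rm).1 = j then some (pvClassify cum total n rm).2 else none)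

-- abstract indexed step shared by both fold analyses
def pvModelStep (st : List String × List Int) (iop : Nat × (Option Int × String)) :
    List String × List Int :=
  (st.1.set iop.1 (pvPartStep (st.1.getD iop.1 "", st.2.getD iop.1 0) iop.2).1,
   st.2.set iop.1 (pvPartStep (st.1.getD iop.1 "", st.2.getD iop.1 0) iop.2).2)

theorem pvGetD_set_ne {α : Type} [Inhabited α] (l : List α) (i j : Nat) (v d : α) (h : i ≠ j) :
    (l.set i v).getD j d = l.getD j d := by
  simp [List.getD, List.getElem?_set_ne h]

theorem pvGetD_set_self {α : Type} [Inhabited α] (l : List α) (j : Nat) (v d : α)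
    (h : j < l.length) : (l.set j v).getD j d = v := by
  simp [List.getD, h]

theorem pvJoin3 (a b c : String) : PySem.Str.join "" [a, b, c] = a ++ b ++ c := by
  apply String.ext
  simp [PySem.Str.toList_join, PySem.Chars.join, List.intercalate, List.intersperse]

-- A's raw step equals the model step on the classified removal
theorem pvStepA_eq_model (split : List String) (hn : split ≠ []) (st : List String × List Int)
    (h1 : st.1.length = split.length) (h2 : st.2.length = split.length) (rm : Int × String) :
    pvStepA (pvCums 0 split) ((pvCums 0 split).getD split.length 0) ((split.length : Int) - 1) st rm
      = pvModelStep st (pvClassify (pvCums 0 split) ((pvCums 0 split).getD split.length 0) split.length rm) := by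
  have hn1 : 1 ≤ split.length := by
    cases split with
    | nil => exact absurd rfl hn
    | cons a b => simp
  have hc : ((split.length : Int) - 1) = ((split.length - 1 : Nat) : Int) := by omega
  by_cases hge : rm.1 ≥ (pvCums 0 split).getD split.length 0
  · simp only [pvStepA, pvClassify, pvModelStep, if_pos hge, pvPartStep]
    rw [hc, PySem.List.pySetD_natCast, PySem.List.pyGetD_natCast]
    rw [Prod.mk.injEq]
    refine ⟨rfl, ?_⟩
    rw [List.getD_eq_getElem st.2 0 (by omega)]
    exact (List.set_getElem_self (by omega)).symm
  · simp only [pvStepA, pvClassify, pvModelStep, if_neg hge, pvPartStep]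
    have hlt : rm.1 < (pvCums 0 split).getD split.length 0 := by omega
    rw [pvIndex_eq split rm.1 hn hlt, pvJoin3]

-- per-index analysis of the model fold
theorem pvModelFold_getD (cum : List Int) (total : Int) (n : Nat) :
    ∀ (rs : List (Int × String)) (st : List String × List Int),
    st.1.length = n → st.2.length = n →
    (rs.foldl (fun s rm => pvModelStep s (pvClassify cum total n rm)) st).1.length = n ∧
    (rs.foldl (fun s rm => pvModelStep s (pvClassify cum total n rm)) st).2.length = n ∧
    ∀ j, j < n →
    ((rs.foldl (fun s rm => pvModelStep s (pvClassify cum total n rm)) st).1.getD j "",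
     (rs.foldl (fun s rm => pvModelStep s (pvClassify cum total n rm)) st).2.getD j 0)
      = (pvOpsFor cum total n j rs).foldl pvPartStep (st.1.getD j "", st.2.getD j 0) := by
  intro rs
  induction rs with
  | nil =>
      intro st h1 h2
      exact ⟨h1, h2, fun j hj => by simp [pvOpsFor]⟩
  | cons rm rs ih =>
      intro st h1 h2
      simp only [List.foldl_cons]
      obtain ⟨g1, g2, g3⟩ := ih (pvModelStep st (pvClassify cum total n rm))
        (by simp [pvModelStep, h1]) (by simp [pvModelStep, h2])
      refine ⟨g1, g2, fun j hj => ?_⟩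
      rw [g3 j hj]
      by_cases hij : (pvClassify cum total n rm).1 = j
      · simp only [pvModelStep, hij]
        rw [pvGetD_set_self _ j _ _ (by omega),
            pvGetD_set_self _ j _ _ (by omega)]
        conv_rhs => rw [pvOpsFor, List.filterMap_cons_some (by rw [if_pos hij]),
                        ← pvOpsFor, List.foldl_cons]
      · simp only [pvModelStep]
        rw [pvGetD_set_ne _ _ j _ _ hij, pvGetD_set_ne _ _ j _ _ hij]
        conv_rhs => rw [pvOpsFor, List.filterMap_cons_none (by rw [if_neg hij]),
                        ← pvOpsFor]

-- B's raw bucket step equals a set on the classified index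
theorem pvBucketStep_eq (cum : List Int) (total : Int) (n : Nat) (hn1 : 1 ≤ n)
    (bk : List (List (Option Int × String))) (rm : Int × String) :
    pvBucketStep cum total n bk rm
      = bk.set (pvClassify cum total n rm).1
          (bk.getD (pvClassify cum total n rm).1 [] ++ [(pvClassify cum total n rm).2]) := by
  have hc : ((n : Int) - 1) = ((n - 1 : Nat) : Int) := by omega
  by_cases hge : rm.1 ≥ total
  · simp only [pvBucketStep, pvClassify, if_pos hge]
    rw [hc, PySem.List.pySetD_natCast, PySem.List.pyGetD_natCast]
  · simp only [pvBucketStep, pvClassify, if_neg hge]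

-- per-index analysis of B's bucket fold
theorem pvBucketFold_getD (cum : List Int) (total : Int) (n : Nat) (hn1 : 1 ≤ n) :
    ∀ (rs : List (Int × String)) (bk : List (List (Option Int × String))),
    bk.length = n →
    (rs.foldl (pvBucketStep cum total n) bk).length = n ∧
    ∀ j, j < n →
    (rs.foldl (pvBucketStep cum total n) bk).getD j []
      = bk.getD j [] ++ pvOpsFor cum total n j rs := by
  intro rs
  induction rs with
  | nil =>
      intro bk hbk
      exact ⟨hbk, fun j hj => by simp [pvOpsFor]⟩
  | cons rm rs ih =>
      intro bk hbk
      simp only [List.foldl_cons]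
      rw [pvBucketStep_eq cum total n hn1]
      obtain ⟨g1, g2⟩ := ih
        (bk.set (pvClassify cum total n rm).1
          (bk.getD (pvClassify cum total n rm).1 [] ++ [(pvClassify cum total n rm).2]))
        (by rw [List.length_set]; exact hbk)
      refine ⟨g1, fun j hj => ?_⟩
      rw [g2 j hj]
      by_cases hij : (pvClassify cum total n rm).1 = j
      · rw [hij, pvGetD_set_self _ j _ _ (by omega)]
        conv_rhs => rw [pvOpsFor, List.filterMap_cons_some (by rw [if_pos hij]),
                        ← pvOpsFor]
        rw [List.append_assoc]
        rfl
      · rw [pvGetD_set_ne _ _ j _ _ hij]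
        conv_rhs => rw [pvOpsFor, List.filterMap_cons_none (by rw [if_neg hij]),
                        ← pvOpsFor]

-- A's raw fold equals the model fold
theorem pvFoldA_eq (split : List String) (hn : split ≠ []) :
    ∀ (rs : List (Int × String)) (st : List String × List Int),
    st.1.length = split.length → st.2.length = split.length →
    rs.foldl (pvStepA (pvCums 0 split) ((pvCums 0 split).getD split.length 0)
        ((split.length : Int) - 1)) st
      = rs.foldl (fun s rm => pvModelStep s
          (pvClassify (pvCums 0 split) ((pvCums 0 split).getD split.length 0) split.length rm)) st := by
  intro rs
  induction rs with
  | nil => intro st h1 h2; rfl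
  | cons rm rs ih =>
      intro st h1 h2
      simp only [List.foldl_cons]
      rw [pvStepA_eq_model split hn st h1 h2 rm]
      exact ih _ (by simp [pvModelStep, h1]) (by simp [pvModelStep, h2])

-- ===== VERDICT (by name: the statement is the Claim_ definition above) =====
theorem add_back_removed_parts_py_spec : Claim_equal_add_back_removed_parts_py := by
  intro split removals hdom hpre
  unfold Spec_add_back_removed_parts_py
  by_cases hsp : split = []
  · have hrm : removals = [] := by
      rcases hpre with h | h
      · exact h
      · exact absurd hsp h
    subst hsp; subst hrm
    rfl
  · -- split ≠ []: both ports are analysed per part index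
    have hn1 : 1 ≤ split.length := by
      cases split with
      | nil => exact absurd rfl hsp
      | cons a b => simp
    simp only [add_back_removed_parts_py, add_back_removed_parts_py_alt]
    rw [pvCumA_eq, pvCumB_eq, pvTotal_eq]
    rw [pvFoldA_eq split hsp removals (split, List.replicate split.length 0) rfl
        (by simp)]
    obtain ⟨m1, m2, m3⟩ := pvModelFold_getD (pvCums 0 split)
      ((pvCums 0 split).getD split.length 0) split.length removals
      (split, List.replicate split.length 0) rfl (by simp)
    obtain ⟨b1, b2⟩ := pvBucketFold_getD (pvCums 0 split)
      ((pvCums 0 split).getD split.length 0) split.length hn1 removals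
      ((List.range split.length).map (fun _ => ([] : List (Option Int × String))))
      (by simp)
    apply List.ext_getElem
    · rw [List.length_map, List.length_zip, m1, b1, Nat.min_self]
    · intro j hjA hjB
      have hj : j < split.length := by
        rw [m1] at hjA
        exact hjA
      rw [← List.getD_eq_getElem _ "" hjA]
      have hpair := m3 j hj
      have hfst := congrArg Prod.fst hpair
      simp only [] at hfst
      rw [hfst]
      rw [List.getElem_map, List.getElem_zip]
      rw [← List.getD_eq_getElem _ ([] : List (Option Int × String)) (by rw [b1]; exact hj)]
      rw [b2 j hj]
      rw [PySem.List.getD_map_range _ _ _ _ hj]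
      simp only [List.nil_append]
      rw [List.getD_eq_getElem split "" hj]
      congr 1
      simp
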